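-- pv_equiv track=rewrite | github.com/philipzhou2009/coding | python/08xx/0862/solution01.py | func
-- ===== SOURCE A (Python) =====
-- from typing import List
--
-- logger = print if True else lambda *arg: None
--
-- def func(nums: List[int], count: int, target: int) -> bool:
--
--     nLen = len(nums)
--
--     result = False
--     for i in range(nLen):
--         logger(i)
--         sum = 0
--
--         if i + count > nLen:
--             break
--
--         # if i ==0:
--         #     for j in range(count):
--         #         sum = sum + nums[j]
--         # else:
--         for j in range(count):
--             sum = sum + nums[i + j]
--
--         logger("sum=", sum)
--         if sum == target:
--             result = True
--             break
--
--     return result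
-- ===== SOURCE B (Python) =====
-- def func(nums, count, target):
--     if count > len(nums):
--         return False
--     s = sum(nums[:count])
--     if s == target:
--         return True
--     for i in range(count, len(nums)):
--         s += nums[i] - nums[i - count]
--         if s == target:
--             return True
--     return False
-- ===== Notes on version B (the rewrite author's own statement) =====
-- stated objective: faster
-- what changed: B replaces A's recomputation of every window sum from scratch (inner loop of length count per start index) with a single sliding-window pass updating a running sum; Pre_ excludes negative count (no meaningful window length: A's value there stems from an empty inner loop, B's from Python's negative slice/index semantics) and the single degenerate input ([], 0, 0), where A's False and B's True (empty window sums to 0) are equally defensible.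
-- outside the precondition, e.g. on func([], 0, 0): A returns False, B returns True; on func([1, 2], -1, 1): A returns False, B returns True
import Mathlib
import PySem

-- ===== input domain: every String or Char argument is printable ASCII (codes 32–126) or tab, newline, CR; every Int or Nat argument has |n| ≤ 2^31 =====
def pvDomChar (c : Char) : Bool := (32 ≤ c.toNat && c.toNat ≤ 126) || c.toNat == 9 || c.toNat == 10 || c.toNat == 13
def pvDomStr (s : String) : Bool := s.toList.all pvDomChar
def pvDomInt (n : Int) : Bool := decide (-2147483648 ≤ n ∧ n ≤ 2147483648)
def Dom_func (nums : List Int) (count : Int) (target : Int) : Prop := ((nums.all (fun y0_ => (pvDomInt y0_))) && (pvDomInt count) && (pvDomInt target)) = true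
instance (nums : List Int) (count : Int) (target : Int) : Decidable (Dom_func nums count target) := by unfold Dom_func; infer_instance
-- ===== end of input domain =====

-- B replaces A's per-start-index recomputation of the window sum with a single sliding-window
-- pass updating a running sum; objective: faster (asymptotic, O(n) vs O(n*count)).
-- (A's `logger` calls only print; they do not affect the return value and are not ported.)

-- ===== PORT A =====
-- inner `for j in range(count): sum = sum + nums[i+j]`; the index i+j is provably in range
-- whenever the loop body runs (i + count ≤ len nums), so the getD default 0 is unreachable.
def funcSum (nums : List Int) (count : Int) (i : Int) : Int :=
  (PySem.List.pyRange 0 count 1).foldl (fun s j => s + PySem.List.pyGetD nums (i + j) 0) 0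

def funcLoop (nums : List Int) (count : Int) (target : Int) (nLen : Int) : List Int → Bool
  | [] => false
  | i :: rest =>
    if nLen < i + count then false
    else if funcSum nums count i = target then true
    else funcLoop nums count target nLen rest

def func (nums : List Int) (count : Int) (target : Int) : Bool :=
  funcLoop nums count target (nums.length : Int) (PySem.List.pyRange 0 (nums.length : Int) 1)

-- ===== PORT B =====
-- indices i and i-count are provably in range in the loop (count ≤ i < len nums), so getD's default is unreachable
def funcAltLoop (nums : List Int) (count : Int) (target : Int) : Int → List Int → Bool
  | _, [] => false
  | s, i :: rest =>
    let s' := s + (PySem.List.pyGetD nums i 0 - PySem.List.pyGetD nums (i - count) 0)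
    if s' = target then true else funcAltLoop nums count target s' rest

def func_alt (nums : List Int) (count : Int) (target : Int) : Bool :=
  if (nums.length : Int) < count then false
  else
    let s := (PySem.List.slice nums none (some count)).sum
    if s = target then true
    else funcAltLoop nums count target s (PySem.List.pyRange count (nums.length : Int) 1)

-- ===== PRECONDITION & SPEC =====
-- Pre_ excludes negative count (no meaningful window length; A's value there stems from an empty
-- inner loop and B's from Python's negative slice/index semantics) and the single degenerate input
-- nums = [], count = 0, target = 0, where A's False (the loop never runs) and B's True (the empty
-- window sums to the target 0) are equally defensible.
def Pre_func (nums : List Int) (count : Int) (target : Int) : Prop :=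
  0 ≤ count ∧ ¬(nums = [] ∧ count = 0 ∧ target = 0)
instance (nums : List Int) (count : Int) (target : Int) : Decidable (Pre_func nums count target) := by unfold Pre_func; infer_instance

def pvWitness_func : List Int × Int × Int := ([1, 2, 3], 2, 5)

def Spec_func (nums : List Int) (count : Int) (target : Int) (out : Bool) : Prop := out = func_alt nums count target
instance (nums : List Int) (count : Int) (target : Int) (out : Bool) : Decidable (Spec_func nums count target out) := by unfold Spec_func; infer_instance

-- ===== CLAIM (what is proved, stated in full; the proofs are below) =====
def Claim_equal_func : Prop := ∀ (nums : List Int) (count : Int) (target : Int), Dom_func nums count target → Pre_func nums count target → Spec_func nums count target (func nums count target)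

-- ===== LEMMAS AND PROOFS =====

lemma funcSum_zero (nums : List Int) (i : Int) :
    funcSum nums 0 i = 0 := by
  unfold funcSum
  rw [PySem.List.pyRange_one_eq_nil (by omega)]
  rfl

lemma altLoop_zero (nums : List Int) (target : Int) (ht : target ≠ 0) :
    ∀ l : List Int, funcAltLoop nums 0 target 0 l = false := by
  intro l
  induction l with
  | nil => rfl
  | cons i rest ih =>
    simp only [funcAltLoop, Int.sub_zero, sub_self, add_zero]
    rw [if_neg (by omega), ih]

lemma sumAux (nums : List Int) (a c : Nat) (h : a + c ≤ nums.length) :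
    (PySem.List.pyRange 0 (c : Int) 1).foldl
        (fun s j => s + PySem.List.pyGetD nums ((a : Int) + j) 0) 0
      = ((nums.drop a).take c).sum := by
  induction c with
  | zero => simp [PySem.List.pyRange_one_eq_nil]
  | succ c ih =>
    rw [show ((c + 1 : Nat) : Int) = (c : Int) + 1 by push_cast; ring]
    rw [PySem.List.pyRange_one_succ_right (by positivity)]
    rw [List.foldl_append]
    simp only [List.foldl_cons, List.foldl_nil]
    rw [ih (by omega)]
    have hcast : (a : Int) + (c : Int) = ((a + c : Nat) : Int) := by push_cast; ring
    rw [hcast, PySem.List.pyGetD_natCast]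
    have hlt : c < (nums.drop a).length := by
      simp only [List.length_drop]; omega
    rw [List.take_add_one, List.getElem?_eq_getElem hlt]
    simp only [Option.toList_some, List.sum_append, List.sum_cons, List.sum_nil, add_zero]
    congr 1
    rw [List.getD_eq_getElem _ _ (by omega), List.getElem_drop]

lemma funcSum_eq_take_drop (nums : List Int) (count i : Int) (hc : 0 ≤ count) (hi : 0 ≤ i)
    (h : i + count ≤ nums.length) :
    funcSum nums count i = ((nums.drop i.toNat).take count.toNat).sum := by
  unfold funcSum
  have h1 : (count : Int) = (count.toNat : Int) := by omega
  have h2 : (i : Int) = (i.toNat : Int) := by omega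
  rw [h1, h2]
  exact sumAux nums i.toNat count.toNat (by omega)

lemma window_slide (nums : List Int) (a c : Nat) (hc : 1 ≤ c) (h : a + c < nums.length) :
    ((nums.drop (a + 1)).take c).sum
      = ((nums.drop a).take c).sum + nums.getD (a + c) 0 - nums.getD a 0 := by
  obtain ⟨c', rfl⟩ : ∃ c', c = c' + 1 := ⟨c - 1, by omega⟩
  have ha : a < nums.length := by omega
  have hd : nums.drop a = nums[a] :: nums.drop (a + 1) := List.drop_eq_getElem_cons ha
  have hlt : c' < (nums.drop (a + 1)).length := by
    simp only [List.length_drop]; omega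
  rw [List.take_add_one, List.getElem?_eq_getElem hlt, hd]
  simp only [List.take_succ_cons, List.sum_cons, Option.toList_some, List.sum_append,
    List.sum_nil, add_zero]
  have h1 : nums.getD (a + (c' + 1)) 0 = (nums.drop (a + 1))[c'] := by
    rw [List.getD_eq_getElem _ _ (by omega), List.getElem_drop]
    congr 1
    omega
  have h2 : nums.getD a 0 = nums[a] := List.getD_eq_getElem _ _ ha
  rw [h1, h2]
  ring

lemma funcSum_slide (nums : List Int) (count j : Int) (hc : 1 ≤ count) (hj : 0 ≤ j)
    (h : j + count < nums.length) :
    funcSum nums count (j + 1)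
      = funcSum nums count j + PySem.List.pyGetD nums (j + count) 0 - PySem.List.pyGetD nums j 0 := by
  rw [funcSum_eq_take_drop nums count (j + 1) (by omega) (by omega) (by omega),
      funcSum_eq_take_drop nums count j (by omega) hj (by omega)]
  have e1 : (j + count : Int) = ((j.toNat + count.toNat : Nat) : Int) := by omega
  have e2 : (j : Int) = ((j.toNat : Nat) : Int) := by omega
  rw [e1, PySem.List.pyGetD_natCast]
  rw [show PySem.List.pyGetD nums j 0 = nums.getD j.toNat 0 by
    rw [e2, PySem.List.pyGetD_natCast, Int.toNat_natCast]]
  have e3 : (j + 1).toNat = j.toNat + 1 := by omega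
  rw [e3]
  exact window_slide nums j.toNat count.toNat (by omega) (by omega)

lemma A_loop_char (nums : List Int) (count target : Int) :
    ∀ (m : Nat) (a : Int), ((nums.length : Int) - a).toNat = m →
      (funcLoop nums count target (nums.length : Int) (PySem.List.pyRange a (nums.length : Int) 1)
        = true
       ↔ ∃ k : Int, a ≤ k ∧ k < (nums.length : Int) ∧ k + count ≤ (nums.length : Int) ∧
            funcSum nums count k = target) := by
  intro m
  induction m with
  | zero =>
    intro a h
    rw [PySem.List.pyRange_one_eq_nil (by omega)]
    simp only [funcLoop, Bool.false_eq_true, false_iff]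
    rintro ⟨k, h1, h2, -, -⟩
    omega
  | succ m ih =>
    intro a h
    rw [PySem.List.pyRange_one_cons (by omega : a < (nums.length : Int))]
    simp only [funcLoop]
    split_ifs with h1 h2
    · simp only [false_iff]
      rintro ⟨k, hk1, -, hk3, -⟩
      omega
    · exact iff_of_true rfl ⟨a, le_refl a, by omega, by omega, h2⟩
    · rw [ih (a + 1) (by omega)]
      constructor
      · rintro ⟨k, hk1, hk2, hk3, hk4⟩
        exact ⟨k, by omega, hk2, hk3, hk4⟩
      · rintro ⟨k, hk1, hk2, hk3, hk4⟩
        refine ⟨k, ?_, hk2, hk3, hk4⟩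
        rcases eq_or_lt_of_le hk1 with rfl | hlt
        · exact absurd hk4 h2
        · omega

lemma B_loop_char (nums : List Int) (count target : Int) (hc : 1 ≤ count) :
    ∀ (m : Nat) (a : Int), count ≤ a → a ≤ (nums.length : Int) →
      ((nums.length : Int) - a).toNat = m →
      (funcAltLoop nums count target (funcSum nums count (a - count))
          (PySem.List.pyRange a (nums.length : Int) 1) = true
       ↔ ∃ k : Int, a ≤ k ∧ k < (nums.length : Int) ∧
            funcSum nums count (k - count + 1) = target) := by
  intro m
  induction m with
  | zero =>
    intro a _ _ h
    rw [PySem.List.pyRange_one_eq_nil (by omega)]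
    simp only [funcAltLoop, Bool.false_eq_true, false_iff]
    rintro ⟨k, h1, h2, -⟩
    omega
  | succ m ih =>
    intro a ha1 ha2 h
    rw [PySem.List.pyRange_one_cons (by omega : a < (nums.length : Int))]
    simp only [funcAltLoop]
    have hs : funcSum nums count (a - count) +
        (PySem.List.pyGetD nums a 0 - PySem.List.pyGetD nums (a - count) 0)
        = funcSum nums count (a - count + 1) := by
      have hsl := funcSum_slide nums count (a - count) (by omega) (by omega) (by omega)
      rw [show a - count + count = a by ring] at hsl
      rw [hsl]; ring
    rw [hs]
    split_ifs with h2
    · exact iff_of_true rfl ⟨a, le_refl a, by omega, h2⟩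
    · have heq : a + 1 - count = a - count + 1 := by ring
      rw [show funcSum nums count (a - count + 1)
            = funcSum nums count (a + 1 - count) by rw [heq]]
      rw [ih (a + 1) (by omega) (by omega) (by omega)]
      constructor
      · rintro ⟨k, hk1, hk2, hk3⟩
        exact ⟨k, by omega, hk2, hk3⟩
      · rintro ⟨k, hk1, hk2, hk3⟩
        refine ⟨k, ?_, hk2, hk3⟩
        rcases eq_or_lt_of_le hk1 with rfl | hlt
        · exact absurd hk3 h2
        · omega

-- ===== VERDICT (by name: the statement is the Claim_ definition above) =====
theorem func_spec : Claim_equal_func := by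
  intro nums count target _ hpre
  obtain ⟨hc0, hdeg⟩ := hpre
  unfold Spec_func func func_alt
  rw [Bool.eq_iff_iff]
  rw [A_loop_char nums count target ((nums.length : Int) - 0).toNat 0 rfl]
  rcases eq_or_lt_of_le hc0 with rfl | hc1'
  · -- count = 0
    rw [if_neg (by omega)]
    have hs0 : (PySem.List.slice nums none (some 0)).sum = (0 : Int) := by
      rw [PySem.List.slice_to nums (by omega)]
      simp
    rw [hs0]
    by_cases ht : (0 : Int) = target
    · rw [if_pos ht]
      have hne : nums ≠ [] := by
        intro h; exact hdeg ⟨h, rfl, ht.symm⟩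
      have hlen : 0 < (nums.length : Int) := by
        cases nums with
        | nil => exact absurd rfl hne
        | cons x xs => simp
      exact iff_of_true ⟨0, le_refl 0, hlen, by omega, by rw [funcSum_zero nums]; exact ht⟩ rfl
    · rw [if_neg ht, altLoop_zero nums target (fun h => ht h.symm)]
      simp only [Bool.false_eq_true, iff_false]
      rintro ⟨k, -, -, -, hk4⟩
      rw [funcSum_zero nums] at hk4
      exact ht hk4
  · have hc1 : 1 ≤ count := hc1'
    by_cases hbig : (nums.length : Int) < count
    · rw [if_pos hbig]
      simp only [Bool.false_eq_true, iff_false]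
      rintro ⟨k, hk1, -, hk3, -⟩
      omega
    · rw [if_neg hbig]
      have hs0 : (PySem.List.slice nums none (some count)).sum = funcSum nums count 0 := by
        rw [PySem.List.slice_to nums (by omega)]
        rw [funcSum_eq_take_drop nums count 0 (by omega) (by omega) (by omega)]
        simp
      rw [hs0]
      by_cases hfirst : funcSum nums count 0 = target
      · rw [if_pos hfirst]
        exact iff_of_true ⟨0, le_refl 0, by omega, by omega, hfirst⟩ rfl
      · rw [if_neg hfirst]
        have hB := B_loop_char nums count target hc1
          ((nums.length : Int) - count).toNat count (le_refl count) (by omega) rfl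
        rw [show count - count = (0 : Int) by ring] at hB
        rw [hB]
        constructor
        · rintro ⟨k, hk1, hk2, hk3, hk4⟩
          have hk0 : k ≠ 0 := by rintro rfl; exact hfirst hk4
          refine ⟨k + count - 1, by omega, by omega, ?_⟩
          rw [show k + count - 1 - count + 1 = k by ring]
          exact hk4
        · rintro ⟨k, hk1, hk2, hk3⟩
          exact ⟨k - count + 1, by omega, by omega, by omega, hk3⟩
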